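-- pv_equiv track=rewrite | github.com/pedro1801/BuscaDNA | Busca.py | PrefixoSufixo
-- ===== SOURCE A (Python) =====
-- def PrefixoSufixo(palavra):
--         listaSuf = []
--         listaPref = []
--         letra_anterior = ''
--         if len(palavra) > 1:
--             for i in range(len(palavra)):
--                 teste = palavra[(len(palavra)-1)-i]
--                 letra_anterior = teste+letra_anterior
--                 if letra_anterior != palavra:
--                     listaSuf.append(letra_anterior)
--             letra_anterior = ''
--             for i in range(len(palavra)):
--                 teste = palavra[i]
--                 letra_anterior = letra_anterior+teste
--                 if letra_anterior != palavra:
--                     listaPref.append(letra_anterior)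
--         intersecao = set(listaPref) & set(listaSuf)  # Encontrando a interseção dos elementos
--
--         if len(intersecao) != 0:
--             quantidade_letras = 0
--             for elemento in intersecao:
--                 if len(elemento) > quantidade_letras:
--                     quantidade_letras = len(elemento)
--             return quantidade_letras
--         else:
--             return 0
-- ===== SOURCE B (Python) =====
-- def PrefixoSufixo(palavra):
--     n = len(palavra)
--     for k in range(n - 1, 0, -1):
--         if palavra[:k] == palavra[n - k:]:
--             return k
--     return 0
-- ===== Notes on version B (the rewrite author's own statement) =====
-- stated objective: faster
-- what changed: Instead of materialising every proper prefix and every proper suffix, intersecting them as sets and scanning for the maximal length, B scans k from n-1 down to 1 and returns the first k whose length-k prefix equals its length-k suffix.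
import Mathlib
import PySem

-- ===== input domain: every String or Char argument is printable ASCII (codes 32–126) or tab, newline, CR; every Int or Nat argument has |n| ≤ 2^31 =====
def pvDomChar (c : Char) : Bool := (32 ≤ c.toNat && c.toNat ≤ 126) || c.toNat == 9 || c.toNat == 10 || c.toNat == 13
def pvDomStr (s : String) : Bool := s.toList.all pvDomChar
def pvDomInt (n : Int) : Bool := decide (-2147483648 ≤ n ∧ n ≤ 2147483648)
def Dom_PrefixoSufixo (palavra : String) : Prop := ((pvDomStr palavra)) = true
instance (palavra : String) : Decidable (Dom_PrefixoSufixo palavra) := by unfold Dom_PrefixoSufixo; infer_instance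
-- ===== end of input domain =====

-- B replaces A's build-all-prefixes/suffixes + set-intersection + max-scan by a
-- single descending scan returning the first matching border length (faster by a
-- constant factor and O(n) space).

-- ===== PORT A =====
def PrefixoSufixo (palavra : String) : Int :=
  let w := palavra.toList
  let n : Int := (w.length : Int)
  let st :=
    if n > 1 then
      let s1 := (PySem.List.pyRange 0 n 1).foldl
        (fun (st : List Char × List (List Char)) i =>
          let teste := PySem.List.pyGetD w ((n - 1) - i) ' '
          let la := teste :: st.1
          if la ≠ w then (la, st.2 ++ [la]) else (la, st.2)) ([], [])
      let s2 := (PySem.List.pyRange 0 n 1).foldl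
        (fun (st : List Char × List (List Char)) i =>
          let teste := PySem.List.pyGetD w i ' '
          let la := st.1 ++ [teste]
          if la ≠ w then (la, st.2 ++ [la]) else (la, st.2)) ([], [])
      (s1.2, s2.2)
    else ([], [])
  let listaSuf := st.1
  let listaPref := st.2
  let intersecao := PySem.Set.inter (PySem.Set.ofList listaPref) (PySem.Set.ofList listaSuf)
  if intersecao.length ≠ 0 then
    intersecao.foldl (fun (q : Int) e => if (e.length : Int) > q then (e.length : Int) else q) 0
  else 0

-- ===== PORT B =====
-- the loop 'for k in range(n-1, 0, -1)' with early return, as structural recursion on k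
def altGo (w : List Char) (n : Nat) : Nat → Int
  | 0 => 0
  | k + 1 =>
    if PySem.List.slice w none (some ((k + 1 : Nat) : Int)) =
       PySem.List.slice w (some (((n - (k + 1) : Nat) : Int))) none
    then ((k + 1 : Nat) : Int)
    else altGo w n k

def PrefixoSufixo_alt (palavra : String) : Int :=
  let w := palavra.toList
  altGo w w.length (w.length - 1)

-- ===== PRECONDITION & SPEC =====
def Spec_PrefixoSufixo (palavra : String) (out : Int) : Prop := out = PrefixoSufixo_alt palavra
instance (palavra : String) (out : Int) : Decidable (Spec_PrefixoSufixo palavra out) := by unfold Spec_PrefixoSufixo; infer_instance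

-- ===== CLAIM (what is proved, stated in full; the proofs are below) =====
def Claim_equal_PrefixoSufixo : Prop := ∀ (palavra : String), Dom_PrefixoSufixo palavra → Spec_PrefixoSufixo palavra (PrefixoSufixo palavra)

-- ===== LEMMAS AND PROOFS =====

lemma altGo_eq (w : List Char) (n k : Nat) :
    altGo w n (k + 1) =
      if w.take (k + 1) = w.drop (n - (k + 1)) then ((k + 1 : Nat) : Int) else altGo w n k := by
  rw [altGo]
  rw [PySem.List.slice_to_natCast, PySem.List.slice_from_natCast]

lemma altGo_ge (w : List Char) (n : Nat) :
    ∀ m k, 1 ≤ k → k ≤ m → w.take k = w.drop (n - k) → (k : Int) ≤ altGo w n m := by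
  intro m
  induction m with
  | zero => intro k h1 h2 _; omega
  | succ m ih =>
    intro k h1 h2 hk
    rw [altGo_eq]
    split_ifs with h
    · exact_mod_cast h2
    · rcases Nat.eq_or_lt_of_le h2 with he | hl
      · exfalso; apply h; rw [← he]; exact hk
      · exact ih k h1 (by omega) hk

lemma altGo_cases (w : List Char) (n : Nat) :
    ∀ m, altGo w n m = 0 ∨
      ∃ k, 1 ≤ k ∧ k ≤ m ∧ w.take k = w.drop (n - k) ∧ altGo w n m = (k : Int) := by
  intro m
  induction m with
  | zero => left; rfl
  | succ m ih =>
    rw [altGo_eq]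
    split_ifs with h
    · right; exact ⟨m + 1, by omega, le_refl _, h, rfl⟩
    · rcases ih with h0 | ⟨k, hk1, hk2, hk3, hk4⟩
      · left; exact h0
      · right; exact ⟨k, hk1, by omega, hk3, hk4⟩

-- generic facts about the running-max-of-a-projection fold
lemma foldl_maxproj_eq (xs : List (List Char)) (init : Int) :
    xs.foldl (fun (q : Int) e => if (e.length : Int) > q then (e.length : Int) else q) init =
    xs.foldl (fun (q : Int) e => max q (e.length : Int)) init := by
  congr 1
  funext q e
  split_ifs with h <;> omega

lemma foldl_max_proj_mem (xs : List (List Char)) (init : Int) :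
    xs.foldl (fun (q : Int) e => max q (e.length : Int)) init = init ∨
      ∃ e ∈ xs, xs.foldl (fun (q : Int) e => max q (e.length : Int)) init = (e.length : Int) := by
  induction xs generalizing init with
  | nil => left; rfl
  | cons x t ih =>
    rcases ih (max init (x.length : Int)) with h | ⟨e, he, hfe⟩
    · simp only [List.foldl_cons] at *
      rcases max_choice init ((x.length : Int)) with hm | hm
      · left; rw [h, hm]
      · right; exact ⟨x, List.mem_cons_self, by rw [h, hm]⟩
    · right; exact ⟨e, List.mem_cons_of_mem _ he, by simpa using hfe⟩

-- the two build loops of A, characterised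
def sufStep (w : List Char) (n : Int) : (List Char × List (List Char)) → Int → (List Char × List (List Char)) :=
  fun st i =>
    let teste := PySem.List.pyGetD w ((n - 1) - i) ' '
    let la := teste :: st.1
    if la ≠ w then (la, st.2 ++ [la]) else (la, st.2)

def prefStep (w : List Char) : (List Char × List (List Char)) → Int → (List Char × List (List Char)) :=
  fun st i =>
    let teste := PySem.List.pyGetD w i ' '
    let la := st.1 ++ [teste]
    if la ≠ w then (la, st.2 ++ [la]) else (la, st.2)

lemma drop_eq_self_iff_of_pos (w : List Char) (j : Nat) (hw : 0 < w.length) :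
    w.drop j = w ↔ j = 0 := by
  constructor
  · intro h
    have := congrArg List.length h
    simp at this
    omega
  · intro h; rw [h]; simp

lemma take_eq_self_iff' (w : List Char) (k : Nat) : w.take k = w ↔ w.length ≤ k := by
  constructor
  · intro h
    have := congrArg List.length h
    simp at this
    omega
  · intro h; exact List.take_of_length_le h

lemma suf_fold (w : List Char) :
    ∀ m, m ≤ w.length →
      (PySem.List.pyRange 0 (m : Int) 1).foldl (sufStep w (w.length : Int)) ([], []) =
        (w.drop (w.length - m),
         ((List.range m).map (fun i => w.drop (w.length - 1 - i))).filter (fun la => la ≠ w)) := by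
  intro m
  induction m with
  | zero => intro _; simp
  | succ m ih =>
    intro hm
    have := PySem.List.pyRange_one_succ_right (a := 0) (b := (m : Int)) (by positivity)
    rw [Nat.cast_succ, this, List.foldl_append, ih (by omega)]
    have hidx : (w.length : Int) - 1 - (m : Int) = ((w.length - 1 - m : Nat) : Int) := by
      rw [Nat.cast_sub (by omega : m ≤ w.length - 1), Nat.cast_sub (by omega : 1 ≤ w.length)]
      norm_num
    have hlt : w.length - 1 - m < w.length := by omega
    simp only [List.foldl_cons, List.foldl_nil, sufStep, hidx,
      PySem.List.pyGetD_natCast, List.getD_eq_getElem _ _ hlt]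
    have hdrop : w[w.length - 1 - m] :: w.drop (w.length - m) = w.drop (w.length - (m + 1)) := by
      rw [show w.length - (m+1) = w.length - 1 - m by omega]
      rw [List.drop_eq_getElem_cons hlt]
      rw [show w.length - 1 - m + 1 = w.length - m from by omega]
    rw [hdrop, List.range_succ, List.map_append, List.filter_append]
    have hidx2 : w.length - 1 - m = w.length - (m + 1) := by omega
    by_cases hE : List.drop (w.length - (m + 1)) w = w <;> simp [hidx2, hE]

lemma pref_fold (w : List Char) :
    ∀ m, m ≤ w.length →
      (PySem.List.pyRange 0 (m : Int) 1).foldl (prefStep w) ([], []) =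
        (w.take m,
         ((List.range m).map (fun i => w.take (i + 1))).filter (fun la => la ≠ w)) := by
  intro m
  induction m with
  | zero => intro _; simp
  | succ m ih =>
    intro hm
    have := PySem.List.pyRange_one_succ_right (a := 0) (b := (m : Int)) (by positivity)
    rw [Nat.cast_succ, this, List.foldl_append, ih (by omega)]
    have hlt : m < w.length := by omega
    simp only [List.foldl_cons, List.foldl_nil, prefStep,
      PySem.List.pyGetD_natCast, List.getD_eq_getElem _ _ hlt]
    have htake : w.take m ++ [w[m]] = w.take (m + 1) := by
      rw [List.take_add_one, List.getElem?_eq_getElem hlt]; rfl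
    rw [htake, List.range_succ, List.map_append, List.filter_append]
    by_cases hc : m + 1 < w.length
    · have hne : w.take (m + 1) ≠ w := by
        intro h; have := (take_eq_self_iff' w (m + 1)).mp h; omega
      simp [hne]
    · have heq : w.take (m + 1) = w := List.take_of_length_le (by omega)
      simp [heq]

lemma mem_listaSuf (w : List Char) (hn : 2 ≤ w.length) (e : List Char) :
    e ∈ ((List.range w.length).map (fun i => w.drop (w.length - 1 - i))).filter (fun la => la ≠ w) ↔
      ∃ l, 1 ≤ l ∧ l ≤ w.length - 1 ∧ e = w.drop (w.length - l) := by
  simp only [List.mem_filter, List.mem_map, List.mem_range, decide_not]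
  constructor
  · rintro ⟨⟨i, hi, rfl⟩, hne⟩
    have hne' : w.drop (w.length - 1 - i) ≠ w := by simpa using hne
    have hj : w.length - 1 - i ≠ 0 := by
      intro h0; exact hne' ((drop_eq_self_iff_of_pos w _ (by omega)).mpr h0)
    refine ⟨i + 1, by omega, by omega, ?_⟩
    congr 1
    omega
  · rintro ⟨l, hl1, hl2, rfl⟩
    refine ⟨⟨l - 1, by omega, by congr 1; omega⟩, ?_⟩
    simp only [Bool.not_eq_eq_eq_not, Bool.not_true, decide_eq_false_iff_not]
    intro h
    have := (drop_eq_self_iff_of_pos w _ (by omega)).mp h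
    omega

lemma mem_listaPref (w : List Char) (hn : 2 ≤ w.length) (e : List Char) :
    e ∈ ((List.range w.length).map (fun i => w.take (i + 1))).filter (fun la => la ≠ w) ↔
      ∃ k, 1 ≤ k ∧ k ≤ w.length - 1 ∧ e = w.take k := by
  simp only [List.mem_filter, List.mem_map, List.mem_range, decide_not]
  constructor
  · rintro ⟨⟨i, hi, rfl⟩, hne⟩
    have hne' : w.take (i + 1) ≠ w := by simpa using hne
    have : ¬ w.length ≤ i + 1 := fun h => hne' ((take_eq_self_iff' w _).mpr h)
    exact ⟨i + 1, by omega, by omega, rfl⟩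
  · rintro ⟨k, hk1, hk2, rfl⟩
    refine ⟨⟨k - 1, by omega, by congr 1; omega⟩, ?_⟩
    simp only [Bool.not_eq_eq_eq_not, Bool.not_true, decide_eq_false_iff_not]
    intro h
    have := (take_eq_self_iff' w k).mp h
    omega

-- the intersection holds exactly the borders of w
lemma mem_intersecao (w : List Char) (hn : 2 ≤ w.length) (e : List Char) :
    e ∈ PySem.Set.inter
          (PySem.Set.ofList (((List.range w.length).map (fun i => w.take (i + 1))).filter (fun la => la ≠ w)))
          (PySem.Set.ofList (((List.range w.length).map (fun i => w.drop (w.length - 1 - i))).filter (fun la => la ≠ w))) ↔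
      ∃ k, 1 ≤ k ∧ k ≤ w.length - 1 ∧ w.take k = w.drop (w.length - k) ∧ e = w.take k := by
  rw [PySem.Set.mem_inter, PySem.Set.mem_ofList, PySem.Set.mem_ofList,
    mem_listaPref w hn e, mem_listaSuf w hn e]
  constructor
  · rintro ⟨⟨k, hk1, hk2, rfl⟩, ⟨l, hl1, hl2, he⟩⟩
    have hlen : (w.take k).length = (w.drop (w.length - l)).length := by rw [← he]
    simp at hlen
    have hkl : k = l := by omega
    subst hkl
    exact ⟨k, hk1, hk2, he, rfl⟩
  · rintro ⟨k, hk1, hk2, hb, rfl⟩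
    exact ⟨⟨k, hk1, hk2, rfl⟩, ⟨k, hk1, hk2, hb⟩⟩

lemma main_eq (w : List Char) :
    (let n : Int := (w.length : Int)
     let st :=
       if n > 1 then
         let s1 := (PySem.List.pyRange 0 n 1).foldl (sufStep w n) ([], [])
         let s2 := (PySem.List.pyRange 0 n 1).foldl (prefStep w) ([], [])
         (s1.2, s2.2)
       else ([], [])
     let listaSuf := st.1
     let listaPref := st.2
     let intersecao := PySem.Set.inter (PySem.Set.ofList listaPref) (PySem.Set.ofList listaSuf)
     if intersecao.length ≠ 0 then
       intersecao.foldl (fun (q : Int) e => if (e.length : Int) > q then (e.length : Int) else q) 0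
     else 0) = altGo w w.length (w.length - 1) := by
  by_cases hn : (1 : Int) < (w.length : Int)
  · have hn2 : 2 ≤ w.length := by exact_mod_cast hn
    simp only [if_pos hn]
    rw [suf_fold w w.length le_rfl, pref_fold w w.length le_rfl]
    simp only []
    rw [foldl_maxproj_eq]
    have hmem := mem_intersecao w hn2
    split_ifs with hne0
    · obtain ⟨hinit, hub⟩ := PySem.List.le_foldl_max_int
        (PySem.Set.inter
          (PySem.Set.ofList (((List.range w.length).map (fun i => w.take (i + 1))).filter (fun la => la ≠ w)))
          (PySem.Set.ofList (((List.range w.length).map (fun i => w.drop (w.length - 1 - i))).filter (fun la => la ≠ w))))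
        (fun e => (e.length : Int)) 0
      set I := PySem.Set.inter
          (PySem.Set.ofList (((List.range w.length).map (fun i => w.take (i + 1))).filter (fun la => la ≠ w)))
          (PySem.Set.ofList (((List.range w.length).map (fun i => w.drop (w.length - 1 - i))).filter (fun la => la ≠ w))) with hI
      set R := I.foldl (fun (q : Int) e => max q (e.length : Int)) 0 with hR
      have hge : ∀ k, 1 ≤ k → k ≤ w.length - 1 → w.take k = w.drop (w.length - k) → (k : Int) ≤ R := by
        intro k h1 h2 h3
        have hkI : w.take k ∈ I := (hmem _).mpr ⟨k, h1, h2, h3, rfl⟩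
        have := hub _ hkI
        simpa [List.length_take, Nat.min_eq_left (show k ≤ w.length by omega)] using this
      rcases foldl_max_proj_mem I 0 with hR0 | ⟨e, heI, hRe⟩
      · rcases altGo_cases w w.length (w.length - 1) with hA0 | ⟨k, h1, h2, h3, hAk⟩
        · rw [← hR] at hR0; rw [hR0, hA0]
        · exfalso
          have := hge k h1 h2 h3
          rw [← hR] at hR0
          rw [hR0] at this
          omega
      · obtain ⟨k, h1, h2, h3, hek⟩ := (hmem e).mp heI
        rw [← hR] at hRe
        have hRk : R = (k : Int) := by
          rw [hRe, hek]
          simp [List.length_take, Nat.min_eq_left (show k ≤ w.length by omega)]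
        have h4 : (k : Int) ≤ altGo w w.length (w.length - 1) :=
          altGo_ge w w.length (w.length - 1) k h1 h2 h3
        rcases altGo_cases w w.length (w.length - 1) with hA0 | ⟨k', h1', h2', h3', hAk'⟩
        · exfalso; rw [hA0] at h4; omega
        · have h5 : (k' : Int) ≤ R := hge k' h1' h2' h3'
          rw [hRk, hAk']
          rw [hRk] at h5
          rw [hAk'] at h4
          have : k = k' := by exact_mod_cast le_antisymm h4 h5
          rw [this]
    · rcases altGo_cases w w.length (w.length - 1) with hA0 | ⟨k, h1, h2, h3, hAk⟩
      · rw [hA0]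
      · exfalso
        have hkI := (hmem _).mpr ⟨k, h1, h2, h3, rfl⟩
        have : (PySem.Set.inter
          (PySem.Set.ofList (((List.range w.length).map (fun i => w.take (i + 1))).filter (fun la => la ≠ w)))
          (PySem.Set.ofList (((List.range w.length).map (fun i => w.drop (w.length - 1 - i))).filter (fun la => la ≠ w)))).length ≠ 0 := by
          intro h0
          rw [List.length_eq_zero_iff] at h0
          rw [h0] at hkI
          simp at hkI
        exact hne0 this
  · have h1 : w.length ≤ 1 := by
      by_contra hc
      exact hn (by exact_mod_cast Nat.lt_of_lt_of_le Nat.one_lt_two (by omega))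
    simp only [if_neg hn]
    rw [show w.length - 1 = 0 from by omega]
    simp [PySem.Set.inter, PySem.Set.ofList, altGo]

-- ===== VERDICT (by name: the statement is the Claim_ definition above) =====
theorem PrefixoSufixo_spec : Claim_equal_PrefixoSufixo := by
  intro palavra _
  unfold Spec_PrefixoSufixo
  exact main_eq palavra.toList
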